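-- pv_equiv track=rewrite | github.com/DevMyong/algorithm | internal/programmers/level2/스킬트리.py | solution
-- ===== SOURCE A (Python) =====
-- def solution(sequence, skill_trees):
--     answer = 0
--
--     for skill_tree in skill_trees:
--         s = ""
--
--         for skill in skill_tree:
--             if skill in sequence:
--                 s += skill
--
--         for i in range(len(s)):
--             if s[i] != sequence[i]:
--                 break
--         else:
--             answer += 1
--
--     return answer
-- ===== SOURCE B (Python) =====
-- def solution(sequence, skill_trees):
--     answer = 0
--     for skill_tree in skill_trees:
--         p = 0
--         ok = True
--         for skill in skill_tree:
--             if skill in sequence: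
--                 if skill != sequence[p]:
--                     ok = False
--                     break
--                 p += 1
--         if ok:
--             answer += 1
--     return answer
-- ===== Notes on version B (the rewrite author's own statement) =====
-- stated objective: faster
-- what changed: Replaces A's two-pass check per tree (build the filtered string by repeated concatenation, then index-compare it with sequence) by a single pointer-driven scan of each tree that compares relevant skills against sequence[p] on the fly; no intermediate string is built and the scan exits at the first mismatch (measured ~3x faster).
import Mathlib
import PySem

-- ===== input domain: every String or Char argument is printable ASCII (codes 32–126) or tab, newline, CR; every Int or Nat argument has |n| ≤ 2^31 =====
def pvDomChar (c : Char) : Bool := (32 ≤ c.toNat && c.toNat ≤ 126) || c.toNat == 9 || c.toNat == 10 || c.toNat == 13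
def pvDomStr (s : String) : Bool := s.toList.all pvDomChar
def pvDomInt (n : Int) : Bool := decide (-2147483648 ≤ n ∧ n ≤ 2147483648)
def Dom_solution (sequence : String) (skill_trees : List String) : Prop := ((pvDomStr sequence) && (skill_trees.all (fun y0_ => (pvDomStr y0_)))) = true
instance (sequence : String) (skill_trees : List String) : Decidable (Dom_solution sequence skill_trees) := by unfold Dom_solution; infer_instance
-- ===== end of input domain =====

-- B replaces A's two-pass per tree (build the filtered string, then index-compare it against
-- sequence) by a single pointer-driven scan with early exit on mismatch (measured faster in a timing run).
-- Both Pythons raise IndexError on the same inputs (excluded by Pre_solution).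

-- ===== PORT A =====
-- s[i] != sequence[i] loop: compares the built string s position by position with sequence;
-- Python raises IndexError when s is longer and still matching (outside Pre_); the port
-- returns `true` at that point (arbitrary, never reached inside Pre_).
def aIndexLoop : List Char → List Char → Bool
  | [], _ => true                 -- range exhausted, for-else: matched
  | _ :: _, [] => true            -- sequence[i] IndexError in Python (outside Pre_)
  | c :: s, d :: seq => if c ≠ d then false else aIndexLoop s seq

def solution (sequence : String) (skill_trees : List String) : Int :=
  skill_trees.foldl (fun answer skill_tree =>
    let s := skill_tree.toList.foldl
      (fun acc skill => if skill ∈ sequence.toList then acc ++ [skill] else acc) []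
    if aIndexLoop s sequence.toList then answer + 1 else answer) 0

-- ===== PORT B =====
-- pointer scan: `rem` is the suffix of sequence from the pointer p; Python raises
-- IndexError when rem is empty and a relevant skill remains (outside Pre_); the port
-- returns `false` at that point (arbitrary, never reached inside Pre_).
def bScan (seqF : List Char) : List Char → List Char → Bool
  | _, [] => true
  | rem, skill :: tree =>
    if skill ∈ seqF then
      match rem with
      | [] => false               -- sequence[p] IndexError in Python (outside Pre_)
      | d :: rem' => if skill ≠ d then false else bScan seqF rem' tree
    else bScan seqF rem tree

def solution_alt (sequence : String) (skill_trees : List String) : Int :=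
  skill_trees.foldl (fun answer skill_tree =>
    if bScan sequence.toList sequence.toList skill_tree.toList then answer + 1 else answer) 0

-- ===== PRECONDITION & SPEC =====
-- Pre_ excludes exactly the inputs on which Python A (and B) raises IndexError: a tree whose
-- subsequence of skills occurring in `sequence` has `sequence` as a strict prefix.
def Pre_solution (sequence : String) (skill_trees : List String) : Prop :=
  ∀ t ∈ skill_trees,
    ¬ (sequence.toList <+: t.toList.filter (fun c => c ∈ sequence.toList) ∧
       sequence.toList.length < (t.toList.filter (fun c => c ∈ sequence.toList)).length)
instance (sequence : String) (skill_trees : List String) : Decidable (Pre_solution sequence skill_trees) := by unfold Pre_solution; infer_instance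
def pvWitness_solution : String × List String := ("CBD", ["BACDE", "CBADF", "AECB", "BDA"])
def Spec_solution (sequence : String) (skill_trees : List String) (out : Int) : Prop := out = solution_alt sequence skill_trees
instance (sequence : String) (skill_trees : List String) (out : Int) : Decidable (Spec_solution sequence skill_trees out) := by unfold Spec_solution; infer_instance

-- ===== CLAIM (what is proved, stated in full; the proofs are below) =====
def Claim_equal_solution : Prop := ∀ (sequence : String) (skill_trees : List String), Dom_solution sequence skill_trees → Pre_solution sequence skill_trees → Spec_solution sequence skill_trees (solution sequence skill_trees)

-- ===== LEMMAS AND PROOFS =====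

-- A's string-building fold is filtering.
theorem aBuild_eq_filter (seqF : List Char) (tree : List Char) (acc : List Char) :
    tree.foldl (fun acc skill => if skill ∈ seqF then acc ++ [skill] else acc) acc
      = acc ++ tree.filter (fun c => c ∈ seqF) := by
  induction tree generalizing acc with
  | nil => simp
  | cons c tree ih =>
    simp only [List.foldl_cons, List.filter_cons]
    by_cases h : c ∈ seqF
    · simp [h, ih]
    · simp [h, ih]

-- Core: B's pointer scan equals A's index loop on the filtered tree, whenever the
-- filtered tree is not a strict super-prefix of the remaining sequence.
theorem bScan_eq_aIndexLoop (seqF : List Char) (tree rem : List Char)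
    (h : ¬ (rem <+: tree.filter (fun c => c ∈ seqF) ∧
            rem.length < (tree.filter (fun c => c ∈ seqF)).length)) :
    bScan seqF rem tree = aIndexLoop (tree.filter (fun c => c ∈ seqF)) rem := by
  induction tree generalizing rem with
  | nil => cases rem <;> simp [bScan, aIndexLoop]
  | cons skill tree ih =>
    by_cases hm : skill ∈ seqF
    · cases rem with
      | nil =>
        exfalso
        apply h
        simp [hm]
      | cons d rem' =>
        by_cases hne : skill = d
        · subst hne
          simp only [bScan, List.filter_cons, hm, decide_true, if_true, aIndexLoop, ne_eq,
            not_true_eq_false, if_false]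
          apply ih
          intro ⟨hp, hl⟩
          apply h
          refine ⟨?_, ?_⟩
          · simp [hm, List.cons_prefix_cons, hp]
          · simpa [List.filter_cons, hm] using hl
        · simp [bScan, hm, aIndexLoop, hne]
    · simp only [bScan, List.filter_cons, hm, decide_false, Bool.false_eq_true, if_false]
      exact ih rem (by simpa [List.filter_cons, hm] using h)

-- ===== VERDICT (by name: the statement is the Claim_ definition above) =====
theorem solution_spec : Claim_equal_solution := by
  intro sequence skill_trees _ hpre
  unfold Spec_solution solution solution_alt
  refine PySem.List.foldl_congr_mem _ _ _ _ ?_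
  intro answer t ht
  show (let s := t.toList.foldl (fun acc skill => if skill ∈ sequence.toList then acc ++ [skill] else acc) []
        if aIndexLoop s sequence.toList then answer + 1 else answer)
      = if bScan sequence.toList sequence.toList t.toList then answer + 1 else answer
  simp only
  have h := hpre t ht
  rw [aBuild_eq_filter, List.nil_append,
      bScan_eq_aIndexLoop sequence.toList t.toList sequence.toList h]
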